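-- pv_equiv track=rewrite | github.com/niklasmohrin/adventofcode2020 | 18_Operation_Order/calc.py | paranthesize_addition
-- ===== SOURCE A (Python) =====
-- def paranthesize_addition(tokens):
--
--     def find_operand_end(i, direction):
--         nesting = tokens[i] in ["(", ")"]
--         while nesting > 0:
--             i += direction
--             nesting_delta = {"(": 1, ")": -1}.get(tokens[i]) or 0
--             nesting_delta *= direction
--             nesting += nesting_delta
--         return i
--
--     i = 0
--     while i < len(tokens):
--         if tokens[i] == "+":
--             l = find_operand_end(i-1, -1)
--             r = find_operand_end(i+1, 1)
--             tokens.insert(r + 1, ")")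
--             tokens.insert(l, "(")
--             i += 1
--         i += 1
--
--     return tokens
-- ===== SOURCE B (Python) =====
-- def paranthesize_addition(tokens):
--     # Recursive-descent re-implementation: parse the expression once (primaries and
--     # operator chains), wrapping each "+" application in parentheses while emitting.
--     # Does not mutate its argument (the original mutates `tokens` in place).
--     if "+" not in tokens:
--         return list(tokens)
--
--     def parse_primary(i):
--         if tokens[i] == "(":
--             inner, j = parse_expr(i + 1)
--             return ["("] + inner + [")"], j + 1
--         return [tokens[i]], i + 1
--
--     def parse_expr(i):
--         acc = []
--         last, i = parse_primary(i)
--         while i < len(tokens) and tokens[i] != ")":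
--             op = tokens[i]
--             rhs, i = parse_primary(i + 1)
--             if op == "+":
--                 last = ["("] + last + ["+"] + rhs + [")"]
--             else:
--                 acc = acc + last + [op]
--                 last = rhs
--         return acc + last, i
--
--     out, _ = parse_expr(0)
--     return out
-- ===== Notes on version B (the rewrite author's own statement) =====
-- stated objective: alternative
-- what changed: B parses the token list once by recursive descent (primaries and operator chains), wrapping each '+' application in parentheses while emitting and never mutating its argument, instead of A's outer rescanning loop that walks operand boundaries token-by-token for every '+' and splices parentheses into the list in place.
-- outside the precondition, e.g. on paranthesize_addition(['+', '1']): A returns ['+', '1', '(', ')'], B raises IndexError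
import Mathlib
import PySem

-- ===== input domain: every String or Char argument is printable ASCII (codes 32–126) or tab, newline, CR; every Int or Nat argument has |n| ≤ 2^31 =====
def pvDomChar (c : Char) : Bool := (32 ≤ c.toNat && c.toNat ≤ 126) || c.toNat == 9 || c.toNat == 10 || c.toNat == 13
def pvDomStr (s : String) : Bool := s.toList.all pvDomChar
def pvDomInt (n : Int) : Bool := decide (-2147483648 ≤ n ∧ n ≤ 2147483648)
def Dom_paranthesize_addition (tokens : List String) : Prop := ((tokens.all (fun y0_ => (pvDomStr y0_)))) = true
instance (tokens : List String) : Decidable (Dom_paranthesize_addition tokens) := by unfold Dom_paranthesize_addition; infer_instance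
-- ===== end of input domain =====

-- B replaces A's repeated index-walking and in-place inserts by a single recursive-descent
-- transform (objective: alternative/simpler structure).  A mutates `tokens` in place and
-- returns it; B never mutates its argument — the equivalence proved here is about the
-- RETURN value only.

-- ===== PORT A =====

-- {"(": 1, ")": -1}.get(t) or 0
def pvDelta (t : String) : Int := if t = "(" then 1 else if t = ")" then -1 else 0

-- the `while nesting > 0` loop of find_operand_end; fuel bounds the walk, none = IndexError
def pvFindLoop (xs : List String) (dir : Int) : Nat → Int → Int → Option Int
  | 0, _, _ => none
  | fuel+1, i, nesting =>
    if 0 < nesting then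
      match PySem.List.pyGet? xs (i + dir) with
      | none => none
      | some t => pvFindLoop xs dir fuel (i + dir) (nesting + pvDelta t * dir)
    else some i

-- find_operand_end(i, direction); 2*len+2 fuel always suffices (the index moves one step
-- per iteration and Python raises IndexError once it leaves [-len, len))
def pvFind (xs : List String) (i : Int) (dir : Int) : Option Int :=
  match PySem.List.pyGet? xs i with
  | none => none
  | some t => pvFindLoop xs dir (2 * xs.length + 2) i (if t = "(" ∨ t = ")" then 1 else 0)

-- the outer `while i < len(tokens)` loop; each iteration advances i by ≥ 1 and a "+"
-- iteration grows the list by 2, so 3*len+2 fuel always suffices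
def pvALoop : Nat → List String → Int → Option (List String)
  | 0, _, _ => none
  | fuel+1, xs, i =>
    if i < (xs.length : Int) then
      if PySem.List.pyGet? xs i = some "+" then
        match pvFind xs (i-1) (-1), pvFind xs (i+1) 1 with
        | some l, some r =>
            pvALoop fuel (PySem.List.insert (PySem.List.insert xs (r+1) ")") l "(") (i+2)
        | _, _ => none
      else pvALoop fuel xs (i+1)
    else some xs

def paranthesize_addition (tokens : List String) : List String :=
  (pvALoop (3 * tokens.length + 2) tokens 0).getD tokens

-- ===== PORT B =====

mutual
-- parse_primary(i)
def pvParseP : List String → Nat → Int → Option (List String × Int)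
  | _, 0, _ => none
  | ts, fuel+1, i =>
    match PySem.List.pyGet? ts i with
    | none => none
    | some t =>
      if t = "(" then
        match pvParseE ts fuel (i+1) with
        | some (inner, j) => some ("(" :: (inner ++ [")"]), j + 1)
        | none => none
      else some ([t], i + 1)

-- parse_expr(i) before its while loop
def pvParseE : List String → Nat → Int → Option (List String × Int)
  | _, 0, _ => none
  | ts, fuel+1, i =>
    match pvParseP ts fuel i with
    | some (last, j) => pvParseLoop ts fuel [] last j
    | none => none

-- the while loop of parse_expr, state (acc, last, i)
def pvParseLoop : List String → Nat → List String → List String → Int → Option (List String × Int)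
  | _, 0, _, _, _ => none
  | ts, fuel+1, acc, last, i =>
    if i < (ts.length : Int) ∧ PySem.List.pyGet? ts i ≠ some ")" then
      match PySem.List.pyGet? ts i with
      | none => none
      | some op =>
        match pvParseP ts fuel (i+1) with
        | some (rhs, j) =>
          if op = "+" then pvParseLoop ts fuel acc ("(" :: (last ++ "+" :: (rhs ++ [")"]))) j
          else pvParseLoop ts fuel (acc ++ last ++ [op]) rhs j
        | none => none
    else some (acc ++ last, i)
end

def paranthesize_addition_alt (tokens : List String) : List String :=
  if tokens.contains "+" then
    -- 2*len+2 fuel always suffices for the recursive descent (each call consumes a token)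
    match pvParseE tokens (2 * tokens.length + 2) 0 with
    | some r => r.1
    | none => tokens
  else tokens

-- ===== PRECONDITION & SPEC =====

-- state machine checking the expression grammar  E := P (op P)* ,  P := atom | "(" E ")"
-- (state: expecting-an-operand flag × open-paren depth; none = reject)
def pvChkStep : Option (Bool × Nat) → String → Option (Bool × Nat)
  | none, _ => none
  | some (true, d), t =>
      if t = "(" then some (true, d+1)
      else if t = ")" ∨ t = "+" then none else some (false, d)
  | some (false, d), t =>
      if t = ")" then (match d with | 0 => none | d'+1 => some (false, d'))
      else if t = "(" then none else some (true, d)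

-- Pre_ excludes lists that contain "+" without being a well-formed infix expression: the
-- function's natural domain; on such junk A raises (IndexError/TypeError) or returns paren
-- placements that are accidents of Python's negative-index wraparound and negative-index
-- list.insert, while B's parser raises or parses the junk differently.
def Pre_paranthesize_addition (tokens : List String) : Prop :=
  tokens.contains "+" = false ∨ tokens.foldl pvChkStep (some (true, 0)) = some (false, 0)

instance (tokens : List String) : Decidable (Pre_paranthesize_addition tokens) := by
  unfold Pre_paranthesize_addition; infer_instance

def pvWitness_paranthesize_addition : List String := ["1", "+", "(", "2", "*", "3", ")"]

def Spec_paranthesize_addition (tokens : List String) (out : List String) : Prop := out = paranthesize_addition_alt tokens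
instance (tokens : List String) (out : List String) : Decidable (Spec_paranthesize_addition tokens out) := by unfold Spec_paranthesize_addition; infer_instance

-- ===== CLAIM (what is proved, stated in full; the proofs are below) =====
def Claim_equal_paranthesize_addition : Prop := ∀ (tokens : List String), Dom_paranthesize_addition tokens → Pre_paranthesize_addition tokens → Spec_paranthesize_addition tokens (paranthesize_addition tokens)


-- ===== LEMMAS AND PROOFS =====

-- Parse trees of the expression grammar:  P := atom | "(" P C ")" ,  C := ε | op P C
mutual
inductive PvP : Type where
  | atom : String → PvP
  | grp : PvP → PvC → PvP
inductive PvC : Type where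
  | nil : PvC
  | more : String → PvP → PvC → PvC
end

mutual
def pvPFlat : PvP → List String
  | .atom a => [a]
  | .grp p c => "(" :: (pvPFlat p ++ pvCFlat c ++ [")"])
def pvCFlat : PvC → List String
  | .nil => []
  | .more o p c => o :: (pvPFlat p ++ pvCFlat c)
end

-- the common transformed form: primaries transformed, every "+" application wrapped
mutual
def pvPT : PvP → List String
  | .atom a => [a]
  | .grp p c => "(" :: (pvCGo [] (pvPT p) c ++ [")"])
def pvCGo : List String → List String → PvC → List String
  | acc, last, .nil => acc ++ last
  | acc, last, .more o p c =>
    if o = "+" then pvCGo acc ("(" :: (last ++ "+" :: (pvPT p ++ [")"]))) c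
    else pvCGo (acc ++ last ++ [o]) (pvPT p) c
end

mutual
def pvPGood : PvP → Prop
  | .atom a => a ≠ "(" ∧ a ≠ ")" ∧ a ≠ "+"
  | .grp p c => pvPGood p ∧ pvCGood c
def pvCGood : PvC → Prop
  | .nil => True
  | .more o p c => o ≠ "(" ∧ o ≠ ")" ∧ pvPGood p ∧ pvCGood c
end

-- number of iterations A's outer loop spends on a segment
mutual
def pvAcP : PvP → Nat
  | .atom _ => 1
  | .grp p c => 2 + pvAcP p + pvAcC c
def pvAcC : PvC → Nat
  | .nil => 0
  | .more o p c => (if o = "+" then 2 else 1) + pvAcP p + pvAcC c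
end

-- fuel needed by B's recursive descent on a segment
mutual
def pvBcP : PvP → Nat
  | .atom _ => 1
  | .grp p c => 2 + pvBcP p + pvBcC c
def pvBcC : PvC → Nat
  | .nil => 1
  | .more _ p c => 1 + pvBcP p + pvBcC c
end

def pvSum (M : List String) : Int := (M.map pvDelta).sum

def pvBal (M : List String) : Prop := (∀ P, P <+: M → 0 ≤ pvSum P) ∧ pvSum M = 0

-- a "capsule": a lone non-paren token, or a balanced parenthesized group
def pvCap (C : List String) : Prop :=
  (∃ a, C = [a] ∧ a ≠ "(" ∧ a ≠ ")") ∨ (∃ M, pvBal M ∧ C = "(" :: M ++ [")"])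

theorem pvSum_nil : pvSum [] = 0 := rfl

theorem pvSum_append (a b : List String) : pvSum (a ++ b) = pvSum a + pvSum b := by
  simp [pvSum]

theorem pvSum_cons (t : String) (b : List String) : pvSum (t :: b) = pvDelta t + pvSum b := by
  simp [pvSum]

theorem pvDelta_lp : pvDelta "(" = 1 := by decide
theorem pvDelta_rp : pvDelta ")" = -1 := by decide

theorem pvBal_nil : pvBal [] := by
  constructor
  · intro P hP; simp [List.prefix_nil] at hP; simp [hP, pvSum]
  · rfl

theorem pvBal_single (t : String) (h : pvDelta t = 0) : pvBal [t] := by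
  constructor
  · intro P hP
    rcases (List.prefix_cons_iff.mp hP) with h1 | ⟨P', rfl, h2⟩
    · simp [h1, pvSum]
    · simp [List.prefix_nil] at h2
      simp [h2, pvSum, h]
  · simp [pvSum, h]

theorem pvBal_append (a b : List String) (ha : pvBal a) (hb : pvBal b) : pvBal (a ++ b) := by
  constructor
  · intro P hP
    rcases hP with ⟨T, hT⟩
    rcases List.append_eq_append_iff.mp hT with ⟨a', h1, h2⟩ | ⟨c', h1, h2⟩
    · exact ha.1 P ⟨a', h1.symm⟩
    · subst h1
      have h3 : 0 ≤ pvSum c' := hb.1 c' ⟨T, h2.symm⟩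
      have h4 := ha.2
      rw [pvSum_append]; omega
  · simp [pvSum_append, ha.2, hb.2]

theorem pvPrefix_cases (P a b : List String) (h : P <+: a ++ b) :
    P <+: a ∨ ∃ Q, Q <+: b ∧ P = a ++ Q := by
  rcases h with ⟨T, hT⟩
  rcases List.append_eq_append_iff.mp hT with ⟨a', h1, h2⟩ | ⟨c', h1, h2⟩
  · exact Or.inl ⟨a', h1.symm⟩
  · exact Or.inr ⟨c', ⟨T, h2.symm⟩, h1⟩

theorem pvBal_wrap (M : List String) (h : pvBal M) : pvBal ("(" :: M ++ [")"]) := by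
  constructor
  · intro P hP
    rw [List.cons_append] at hP
    rcases List.prefix_cons_iff.mp hP with h1 | ⟨P', rfl, h2⟩
    · simp [h1, pvSum]
    · rw [pvSum_cons, pvDelta_lp]
      rcases pvPrefix_cases P' M [")"] h2 with h3 | ⟨Q, h3, rfl⟩
      · have := h.1 P' h3
        omega
      · have h4 : -1 ≤ pvSum Q := by
          rcases List.prefix_cons_iff.mp h3 with h5 | ⟨Q', rfl, h5⟩
          · simp [h5, pvSum]
          · simp only [List.prefix_nil] at h5
            subst h5
            simp [pvSum, pvDelta_rp]
        have h5 := h.2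
        rw [pvSum_append]
        omega
  · rw [List.cons_append, pvSum_cons, pvDelta_lp, pvSum_append, h.2]
    simp [pvSum, pvDelta_rp]

theorem pvSum_suffix_nonpos (M S : List String) (h : pvBal M) (hS : S <:+ M) : pvSum S ≤ 0 := by
  rcases hS with ⟨T, rfl⟩
  have := h.1 T ⟨S, rfl⟩
  have := h.2
  rw [pvSum_append] at this
  omega

theorem pvCap_bal (C : List String) (h : pvCap C) : pvBal C := by
  rcases h with ⟨a, rfl, h1, h2⟩ | ⟨M, hM, rfl⟩
  · exact pvBal_single a (by simp [pvDelta, h1, h2])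
  · exact pvBal_wrap M hM

-- goodness gives balance / capsule shape, for raw and transformed segments
mutual
theorem pvPFlat_bal (p : PvP) (hp : pvPGood p) : pvBal (pvPFlat p) := by
  cases p with
  | atom a =>
    simp only [pvPGood] at hp
    exact pvBal_single a (by simp [pvDelta, hp.1, hp.2.1])
  | grp p c =>
    simp only [pvPGood] at hp
    have := pvBal_wrap (pvPFlat p ++ pvCFlat c)
      (pvBal_append _ _ (pvPFlat_bal p hp.1) (pvCFlat_bal c hp.2))
    simpa [pvPFlat, List.append_assoc] using this
theorem pvCFlat_bal (c : PvC) (hc : pvCGood c) : pvBal (pvCFlat c) := by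
  cases c with
  | nil => exact pvBal_nil
  | more o p c =>
    simp only [pvCGood] at hc
    have : pvBal ([o] ++ (pvPFlat p ++ pvCFlat c)) :=
      pvBal_append _ _ (pvBal_single o (by simp [pvDelta, hc.1, hc.2.1]))
        (pvBal_append _ _ (pvPFlat_bal p hc.2.2.1) (pvCFlat_bal c hc.2.2.2))
    simpa [pvCFlat] using this
end

theorem pvPFlat_cap (p : PvP) (hp : pvPGood p) : pvCap (pvPFlat p) := by
  cases p with
  | atom a =>
    simp only [pvPGood] at hp
    exact Or.inl ⟨a, by simp [pvPFlat], hp.1, hp.2.1⟩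
  | grp p c =>
    simp only [pvPGood] at hp
    exact Or.inr ⟨pvPFlat p ++ pvCFlat c,
      pvBal_append _ _ (pvPFlat_bal p hp.1) (pvCFlat_bal c hp.2),
      by simp [pvPFlat, List.append_assoc]⟩

mutual
theorem pvPT_bal (p : PvP) (hp : pvPGood p) : pvBal (pvPT p) := by
  cases p with
  | atom a =>
    simp only [pvPGood] at hp
    exact pvBal_single a (by simp [pvDelta, hp.1, hp.2.1])
  | grp p c =>
    simp only [pvPGood] at hp
    have := pvBal_wrap (pvCGo [] (pvPT p) c)
      (pvCGo_bal c hp.2 [] (pvPT p) pvBal_nil (pvPT_bal p hp.1))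
    simpa [pvPT] using this
theorem pvCGo_bal (c : PvC) (hc : pvCGood c) :
    ∀ acc last, pvBal acc → pvBal last → pvBal (pvCGo acc last c) := by
  cases c with
  | nil =>
    intro acc last hacc hlast
    exact pvBal_append _ _ hacc hlast
  | more o p c =>
    intro acc last hacc hlast
    simp only [pvCGood] at hc
    by_cases ho : o = "+"
    · subst ho
      simp only [pvCGo, if_pos]
      apply pvCGo_bal c hc.2.2.2 _ _ hacc
      have hM : pvBal (last ++ "+" :: pvPT p) := by
        have := pvBal_append _ _ hlast
          (pvBal_append ["+"] _ (pvBal_single _ (by simp [pvDelta])) (pvPT_bal p hc.2.2.1))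
        simpa using this
      have := pvBal_wrap _ hM
      simpa [List.append_assoc] using this
    · simp only [pvCGo, if_neg ho]
      apply pvCGo_bal c hc.2.2.2 _ _ _ (pvPT_bal p hc.2.2.1)
      exact pvBal_append _ _ (pvBal_append _ _ hacc hlast)
        (pvBal_single o (by simp [pvDelta, hc.1, hc.2.1]))
end

theorem pvPT_cap (p : PvP) (hp : pvPGood p) : pvCap (pvPT p) := by
  cases p with
  | atom a =>
    simp only [pvPGood] at hp
    exact Or.inl ⟨a, by simp [pvPT], hp.1, hp.2.1⟩
  | grp p c =>
    simp only [pvPGood] at hp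
    exact Or.inr ⟨pvCGo [] (pvPT p) c,
      pvCGo_bal c hp.2 [] (pvPT p) pvBal_nil (pvPT_bal p hp.1),
      by simp [pvPT]⟩

-- ---- the two walk lemmas for find_operand_end ----

theorem pvFindLoop_step (xs : List String) (dir : Int) (fuel : Nat) (i nest : Int)
    (h : 0 < nest) (t : String) (hg : PySem.List.pyGet? xs (i + dir) = some t) :
    pvFindLoop xs dir (fuel+1) i nest = pvFindLoop xs dir fuel (i + dir) (nest + pvDelta t * dir) := by
  simp only [pvFindLoop]
  rw [if_pos h, hg]

theorem pvFindLoop_stop (xs : List String) (dir : Int) (fuel : Nat) (i nest : Int)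
    (h : ¬ 0 < nest) :
    pvFindLoop xs dir (fuel+1) i nest = some i := by
  simp only [pvFindLoop]
  rw [if_neg h]

theorem pvFind_eq (xs : List String) (i : Int) (dir : Int) (t : String)
    (hg : PySem.List.pyGet? xs i = some t) :
    pvFind xs i dir
      = pvFindLoop xs dir (2 * xs.length + 2) i (if t = "(" ∨ t = ")" then 1 else 0) := by
  unfold pvFind
  rw [hg]

theorem pvWalkL (M : List String) : ∀ (W Z : List String) (nest : Int) (fuel : Nat) (i : Int),
    i = (W.length : Int) + 1 + M.length →
    M.length + 2 ≤ fuel →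
    (∀ S, S <:+ M → 0 < nest - pvSum S) →
    nest - pvSum M = 1 →
    pvFindLoop (W ++ "(" :: (M ++ Z)) (-1) fuel i nest
      = some (W.length : Int) := by
  induction M using List.reverseRecOn with
  | nil =>
    intro W Z nest fuel i hi hf hS hF
    rw [pvSum_nil] at hF
    obtain ⟨f, rfl⟩ : ∃ f, fuel = f + 2 := ⟨fuel - 2, by omega⟩
    have hg : PySem.List.pyGet? (W ++ "(" :: ([] ++ Z)) (i + -1) = some "(" := by
      have := PySem.List.pyGet?_append_length W ([] ++ Z) "("
      convert this using 2
      simp at hi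
      omega
    rw [pvFindLoop_step _ _ _ _ _ (by omega) "(" hg]
    rw [pvFindLoop_stop _ _ _ _ _ (by rw [pvDelta_lp]; omega)]
    congr 1
    simp at hi
    omega
  | append_singleton M' t ihM =>
    intro W Z nest fuel i hi hf hS hF
    have hxs : W ++ "(" :: ((M' ++ [t]) ++ Z) = W ++ "(" :: (M' ++ (t :: Z)) := by
      simp
    rw [hxs]
    obtain ⟨f, rfl⟩ : ∃ f, fuel = f + 1 := ⟨fuel - 1, by omega⟩
    have hg : PySem.List.pyGet? (W ++ "(" :: (M' ++ (t :: Z))) (i + -1) = some t := by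
      have h1 := PySem.List.pyGet?_append_length (W ++ "(" :: M') (Z) t
      have h2 : (W ++ "(" :: M') ++ t :: Z = W ++ "(" :: (M' ++ (t :: Z)) := by simp
      rw [h2] at h1
      convert h1 using 2
      simp at hi ⊢
      omega
    have h0 : 0 < nest := by
      have := hS [] (by simp)
      rw [pvSum_nil] at this
      omega
    rw [pvFindLoop_step _ _ _ _ _ h0 t hg]
    apply ihM W (t :: Z) (nest + pvDelta t * -1) f (i + -1)
    · simp at hi ⊢
      omega
    · simp at hf
      omega
    · intro S hSuf
      have h3 : S ++ [t] <:+ M' ++ [t] := by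
        rcases hSuf with ⟨T, hT⟩
        exact ⟨T, by rw [← List.append_assoc, hT]⟩
      have := hS (S ++ [t]) h3
      rw [pvSum_append] at this
      have h5 : pvSum [t] = pvDelta t := by simp [pvSum]
      rw [h5] at this
      omega
    · rw [pvSum_append] at hF
      have h5 : pvSum [t] = pvDelta t := by simp [pvSum]
      rw [h5] at hF
      omega

theorem pvWalkR (M : List String) : ∀ (V Z : List String) (nest : Int) (fuel : Nat) (i : Int),
    i = (V.length : Int) - 1 →
    M.length + 2 ≤ fuel →
    (∀ P, P <+: M → 0 < nest + pvSum P) →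
    nest + pvSum M = 1 →
    pvFindLoop (V ++ (M ++ ")" :: Z)) 1 fuel i nest
      = some ((V.length : Int) + M.length) := by
  induction M with
  | nil =>
    intro V Z nest fuel i hi hf hS hF
    rw [pvSum_nil] at hF
    obtain ⟨f, rfl⟩ : ∃ f, fuel = f + 2 := ⟨fuel - 2, by omega⟩
    have hg : PySem.List.pyGet? (V ++ ([] ++ ")" :: Z)) (i + 1) = some ")" := by
      have := PySem.List.pyGet?_append_length V Z ")"
      convert this using 2
      omega
    rw [pvFindLoop_step _ _ _ _ _ (by omega) ")" hg]
    rw [pvFindLoop_stop _ _ _ _ _ (by rw [pvDelta_rp]; omega)]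
    congr 1
    simp
    omega
  | cons t M' ihM =>
    intro V Z nest fuel i hi hf hS hF
    have hxs : V ++ ((t :: M') ++ ")" :: Z) = (V ++ [t]) ++ (M' ++ ")" :: Z) := by simp
    obtain ⟨f, rfl⟩ : ∃ f, fuel = f + 1 := ⟨fuel - 1, by omega⟩
    have hg : PySem.List.pyGet? (V ++ ((t :: M') ++ ")" :: Z)) (i + 1) = some t := by
      have h1 := PySem.List.pyGet?_append_length V ((M' ++ ")" :: Z)) t
      have h2 : V ++ t :: (M' ++ ")" :: Z) = V ++ ((t :: M') ++ ")" :: Z) := by simp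
      rw [h2] at h1
      convert h1 using 2
      omega
    have h0 : 0 < nest := by
      have := hS [] (by simp)
      rw [pvSum_nil] at this
      omega
    rw [pvFindLoop_step _ _ _ _ _ h0 t hg]
    rw [hxs]
    have hres := ihM (V ++ [t]) Z (nest + pvDelta t * 1) f (i + 1)
      (by simp; omega)
      (by simp at hf; omega)
      (by
        intro P hPre
        have h3 : t :: P <+: t :: M' := by
          rcases hPre with ⟨T, hT⟩
          exact ⟨T, by rw [List.cons_append, hT]⟩
        have := hS (t :: P) h3
        rw [pvSum_cons] at this
        omega)
      (by rw [pvSum_cons] at hF; omega)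
    rw [hres]
    congr 1
    simp
    omega

theorem pvFindL (W C Z : List String) (h : pvCap C) :
    pvFind (W ++ C ++ Z) ((W.length : Int) + C.length - 1) (-1) = some (W.length : Int) := by
  rcases h with ⟨a, rfl, h1, h2⟩ | ⟨M, hM, rfl⟩
  · have hxs : W ++ [a] ++ Z = W ++ a :: Z := by simp
    rw [hxs]
    have hg : PySem.List.pyGet? (W ++ a :: Z) ((W.length : Int) + ([a] : List String).length - 1)
        = some a := by
      have := PySem.List.pyGet?_append_length W Z a
      convert this using 2
      simp
    rw [pvFind_eq _ _ _ _ hg]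
    rw [if_neg (by simp [h1, h2])]
    obtain ⟨f, hf⟩ : ∃ f, 2 * (W ++ a :: Z).length + 2 = f + 1 := ⟨2 * (W ++ a :: Z).length + 1, rfl⟩
    rw [hf]
    rw [pvFindLoop_stop _ _ _ _ _ (by omega)]
    congr 1
    simp
  · have hxs : W ++ (("(" :: M) ++ [")"]) ++ Z = (W ++ "(" :: M) ++ ")" :: Z := by simp
    rw [hxs]
    have hg : PySem.List.pyGet? ((W ++ "(" :: M) ++ ")" :: Z)
        ((W.length : Int) + (("(" :: M) ++ [")"] : List String).length - 1) = some ")" := by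
      have := PySem.List.pyGet?_append_length (W ++ "(" :: M) Z ")"
      convert this using 2
      simp
      omega
    rw [pvFind_eq _ _ _ _ hg]
    rw [if_pos (Or.inr rfl)]
    have hxs2 : (W ++ "(" :: M) ++ ")" :: Z = W ++ "(" :: (M ++ ")" :: Z) := by simp
    rw [hxs2]
    apply pvWalkL M W (")" :: Z) 1 _ _
    · simp
      omega
    · simp
      omega
    · intro S hSuf
      have := pvSum_suffix_nonpos M S hM hSuf
      omega
    · rw [hM.2]
      omega

theorem pvFindR (W C Z : List String) (h : pvCap C) :
    pvFind (W ++ C ++ Z) ((W.length : Int)) 1 = some ((W.length : Int) + C.length - 1) := by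
  rcases h with ⟨a, rfl, h1, h2⟩ | ⟨M, hM, rfl⟩
  · have hxs : W ++ [a] ++ Z = W ++ a :: Z := by simp
    rw [hxs]
    have hg : PySem.List.pyGet? (W ++ a :: Z) ((W.length : Int)) = some a :=
      PySem.List.pyGet?_append_length W Z a
    rw [pvFind_eq _ _ _ _ hg]
    rw [if_neg (by simp [h1, h2])]
    obtain ⟨f, hf⟩ : ∃ f, 2 * (W ++ a :: Z).length + 2 = f + 1 := ⟨2 * (W ++ a :: Z).length + 1, rfl⟩
    rw [hf]
    rw [pvFindLoop_stop _ _ _ _ _ (by omega)]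
    congr 1
    simp
  · have hxs : W ++ (("(" :: M) ++ [")"]) ++ Z = W ++ "(" :: (M ++ ")" :: Z) := by simp
    rw [hxs]
    have hg : PySem.List.pyGet? (W ++ "(" :: (M ++ ")" :: Z)) ((W.length : Int)) = some "(" := by
      have := PySem.List.pyGet?_append_length W (M ++ ")" :: Z) "("
      convert this using 2
    rw [pvFind_eq _ _ _ _ hg]
    rw [if_pos (Or.inl rfl)]
    have hxs2 : W ++ "(" :: (M ++ ")" :: Z) = (W ++ ["("]) ++ (M ++ ")" :: Z) := by simp
    rw [hxs2]
    have hres := pvWalkR M (W ++ ["("]) Z 1 (2 * ((W ++ ["("]) ++ (M ++ ")" :: Z)).length + 2)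
      ((W.length : Int))
      (by simp)
      (by simp; omega)
      (by
        intro P hPre
        have := hM.1 P hPre
        omega)
      (by rw [hM.2]; omega)
    rw [hres]
    congr 1
    simp
    omega

-- ---- small step lemmas for A's outer loop ----

theorem pvInsert_splice (U V : List String) (s : String) :
    PySem.List.insert (U ++ V) ((U.length : Nat) : Int) s = U ++ s :: V := by
  rw [PySem.List.insert_natCast _ _ _ (by simp)]
  simp

theorem pvALoop_skip (pre : List String) (t : String) (post : List String) (ht : t ≠ "+")
    (fuel : Nat) :
    pvALoop (fuel+1) (pre ++ t :: post) ((pre.length : Int))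
      = pvALoop fuel (pre ++ t :: post) ((pre.length : Int) + 1) := by
  have hlen : ((pre.length : Int)) < (((pre ++ t :: post).length : Nat) : Int) := by
    simp only [List.length_append, List.length_cons]
    omega
  have hg : PySem.List.pyGet? (pre ++ t :: post) ((pre.length : Int)) = some t :=
    PySem.List.pyGet?_append_length _ _ _
  simp only [pvALoop]
  rw [if_pos hlen, hg]
  simp [ht]

theorem pvALoop_done (xs : List String) (i : Int) (h : (xs.length : Int) ≤ i) (fuel : Nat) :
    pvALoop (fuel+1) xs i = some xs := by
  simp [pvALoop, not_lt.mpr h]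

theorem pvALoop_noplus (xs : List String) (hx : "+" ∉ xs) : ∀ (fuel : Nat) (i : Int),
    0 ≤ i → i ≤ (xs.length : Int) → (xs.length : Int) < fuel + i → pvALoop fuel xs i = some xs := by
  intro fuel
  induction fuel with
  | zero => intro i h0 h1 h2; exfalso; omega
  | succ f ih =>
    intro i h0 h1 h2
    by_cases hlt : i < (xs.length : Int)
    · have h3 : i.toNat < xs.length := by omega
      have hg : PySem.List.pyGet? xs i = some xs[i.toNat] := by
        rw [PySem.List.pyGet?_of_nonneg xs h0]
        exact List.getElem?_eq_getElem h3
      have hne : xs[i.toNat] ≠ "+" := fun h => hx (h ▸ List.getElem_mem h3)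
      simp only [pvALoop]
      rw [if_pos hlt, hg]
      rw [if_neg (by simpa using hne)]
      exact ih (i+1) (by omega) (by omega) (by omega)
    · exact pvALoop_done xs i (by omega) f

-- ---- A's loop transforms a segment exactly like pvPT / pvCGo ----

theorem pvALoop_plus (xs : List String) (fuel : Nat) (i l r : Int)
    (hlt : i < (xs.length : Int)) (hg : PySem.List.pyGet? xs i = some "+")
    (hfl : pvFind xs (i-1) (-1) = some l) (hfr : pvFind xs (i+1) 1 = some r) :
    pvALoop (fuel+1) xs i
      = pvALoop fuel (PySem.List.insert (PySem.List.insert xs (r+1) ")") l "(") (i+2) := by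
  simp only [pvALoop]
  rw [if_pos hlt, hg, if_pos rfl, hfl, hfr]

mutual
theorem pvLA_P (p : PvP) (hp : pvPGood p) : ∀ (X K : List String) (fuel : Nat),
    pvALoop (pvAcP p + fuel) (X ++ pvPFlat p ++ K) ((X.length : Int))
      = pvALoop fuel (X ++ pvPT p ++ K) ((X.length : Int) + (pvPT p).length) := by
  cases p with
  | atom a =>
    intro X K fuel
    simp only [pvPGood] at hp
    have hc1 : pvAcP (.atom a) + fuel = fuel + 1 := by simp [pvAcP]; omega
    rw [hc1]
    have hxs : X ++ pvPFlat (.atom a) ++ K = X ++ a :: K := by simp [pvPFlat]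
    rw [hxs]
    rw [pvALoop_skip X a K hp.2.2 fuel]
    have hxs2 : X ++ pvPT (.atom a) ++ K = X ++ a :: K := by simp [pvPT]
    rw [hxs2]
    congr 1
  | grp p c =>
    intro X K fuel
    simp only [pvPGood] at hp
    have hc1 : pvAcP (.grp p c) + fuel = (pvAcP p + (pvAcC c + (1 + fuel))) + 1 := by
      simp [pvAcP]; omega
    rw [hc1]
    have hxs : X ++ pvPFlat (.grp p c) ++ K
        = X ++ "(" :: (pvPFlat p ++ (pvCFlat c ++ (")" :: K))) := by simp [pvPFlat]
    rw [hxs]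
    rw [pvALoop_skip X "(" (pvPFlat p ++ (pvCFlat c ++ (")" :: K))) (by decide)
      (pvAcP p + (pvAcC c + (1 + fuel)))]
    have h1 := pvLA_P p hp.1 (X ++ ["("]) (pvCFlat c ++ (")" :: K)) (pvAcC c + (1 + fuel))
    have e1 : (X ++ ["("]) ++ pvPFlat p ++ (pvCFlat c ++ (")" :: K))
        = X ++ "(" :: (pvPFlat p ++ (pvCFlat c ++ (")" :: K))) := by simp
    have e1b : (X ++ ["("]) ++ pvPT p ++ (pvCFlat c ++ (")" :: K))
        = X ++ "(" :: (pvPT p ++ (pvCFlat c ++ (")" :: K))) := by simp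
    have e2 : (((X ++ ["("]).length : Nat) : Int) = (X.length : Int) + 1 := by simp
    rw [e1, e1b, e2] at h1
    rw [h1]
    have h2 := pvLA_C c hp.2 (X ++ ["("]) [] (pvPT p) (")" :: K) (1 + fuel) (pvPT_cap p hp.1)
    have e3 : (X ++ ["("]) ++ [] ++ pvPT p ++ pvCFlat c ++ (")" :: K)
        = X ++ "(" :: (pvPT p ++ (pvCFlat c ++ (")" :: K))) := by simp
    have e4 : (((X ++ ["("]).length : Nat) : Int) + (([] : List String).length : Int)
          + ((pvPT p).length : Int)
        = (X.length : Int) + 1 + ((pvPT p).length : Int) := by simp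
    rw [e3, e4] at h2
    rw [h2]
    have e5 : (X ++ ["("]) ++ pvCGo [] (pvPT p) c ++ (")" :: K)
        = (X ++ "(" :: pvCGo [] (pvPT p) c) ++ ")" :: K := by simp
    rw [e5]
    have e6 : (((X ++ ["("]).length : Nat) : Int) + ((pvCGo [] (pvPT p) c).length : Int)
        = (((X ++ "(" :: pvCGo [] (pvPT p) c).length : Nat) : Int) := by
      simp
      omega
    rw [e6]
    have hcomm : 1 + fuel = fuel + 1 := by omega
    rw [hcomm]
    rw [pvALoop_skip (X ++ "(" :: pvCGo [] (pvPT p) c) ")" K (by decide) fuel]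
    congr 1
    · simp [pvPT]
    · simp [pvPT]
      omega
theorem pvLA_C (c : PvC) (hc : pvCGood c) : ∀ (X acc last K : List String) (fuel : Nat),
    pvCap last →
    pvALoop (pvAcC c + fuel) (X ++ acc ++ last ++ pvCFlat c ++ K)
        ((X.length : Int) + acc.length + last.length)
      = pvALoop fuel (X ++ pvCGo acc last c ++ K) ((X.length : Int) + (pvCGo acc last c).length) := by
  cases c with
  | nil =>
    intro X acc last K fuel hcap
    have hc0 : pvAcC .nil + fuel = fuel := by simp [pvAcC]
    rw [hc0]
    congr 1
    · simp [pvCGo, pvCFlat]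
    · simp [pvCGo]
      omega
  | more o p c' =>
    intro X acc last K fuel hcap
    simp only [pvCGood] at hc
    by_cases ho : o = "+"
    · subst ho
      have hc1 : pvAcC (.more "+" p c') + fuel
          = ((pvAcP p + ((pvAcC c' + fuel) + 1)) + 1) := by
        simp [pvAcC]; omega
      rw [hc1]
      have hxs : X ++ acc ++ last ++ pvCFlat (.more "+" p c') ++ K
          = (X ++ acc ++ last) ++ "+" :: (pvPFlat p ++ (pvCFlat c' ++ K)) := by
        simp [pvCFlat]
      rw [hxs]
      have hidx : (X.length : Int) + (acc.length : Int) + (last.length : Int)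
          = (((X ++ acc ++ last).length : Nat) : Int) := by
        simp
        omega
      rw [hidx]
      have hlt : (((X ++ acc ++ last).length : Nat) : Int)
          < ((((X ++ acc ++ last) ++ "+" :: (pvPFlat p ++ (pvCFlat c' ++ K))).length : Nat) : Int) := by
        simp
        omega
      have hg : PySem.List.pyGet? ((X ++ acc ++ last) ++ "+" :: (pvPFlat p ++ (pvCFlat c' ++ K)))
          ((((X ++ acc ++ last).length : Nat) : Int)) = some "+" :=
        PySem.List.pyGet?_append_length _ _ "+"
      have hfl : pvFind ((X ++ acc ++ last) ++ "+" :: (pvPFlat p ++ (pvCFlat c' ++ K)))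
          ((((X ++ acc ++ last).length : Nat) : Int) - 1) (-1)
          = some (((X ++ acc).length : Nat) : Int) := by
        have h := pvFindL (X ++ acc) last ("+" :: (pvPFlat p ++ (pvCFlat c' ++ K))) hcap
        have eL : (X ++ acc) ++ last ++ ("+" :: (pvPFlat p ++ (pvCFlat c' ++ K)))
            = (X ++ acc ++ last) ++ "+" :: (pvPFlat p ++ (pvCFlat c' ++ K)) := by simp
        rw [eL] at h
        have eI : (((X ++ acc).length : Nat) : Int) + ((last.length : Nat) : Int) - 1
            = (((X ++ acc ++ last).length : Nat) : Int) - 1 := by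
          simp
          omega
        rw [eI] at h
        exact h
      have hfr : pvFind ((X ++ acc ++ last) ++ "+" :: (pvPFlat p ++ (pvCFlat c' ++ K)))
          ((((X ++ acc ++ last).length : Nat) : Int) + 1) 1
          = some ((((X ++ acc ++ last).length : Nat) : Int) + 1 + ((pvPFlat p).length : Int) - 1) := by
        have h := pvFindR ((X ++ acc ++ last) ++ ["+"]) (pvPFlat p) (pvCFlat c' ++ K)
          (pvPFlat_cap p hc.2.2.1)
        have eL : ((X ++ acc ++ last) ++ ["+"]) ++ pvPFlat p ++ (pvCFlat c' ++ K)
            = (X ++ acc ++ last) ++ "+" :: (pvPFlat p ++ (pvCFlat c' ++ K)) := by simp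
        rw [eL] at h
        have eI : ((((X ++ acc ++ last) ++ ["+"]).length : Nat) : Int)
            = (((X ++ acc ++ last).length : Nat) : Int) + 1 := by
          simp
          omega
        rw [eI] at h
        exact h
      rw [pvALoop_plus _ _ _ _ _ hlt hg hfl hfr]
      -- the two inserts
      have eIns1 : (((X ++ acc ++ last).length : Nat) : Int) + 1 + ((pvPFlat p).length : Int) - 1 + 1
          = ((((X ++ acc ++ last) ++ "+" :: pvPFlat p).length : Nat) : Int) := by
        simp
        omega
      have eSplit1 : (X ++ acc ++ last) ++ "+" :: (pvPFlat p ++ (pvCFlat c' ++ K))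
          = ((X ++ acc ++ last) ++ "+" :: pvPFlat p) ++ (pvCFlat c' ++ K) := by simp
      rw [eIns1, eSplit1, pvInsert_splice]
      have eSplit2 : ((X ++ acc ++ last) ++ "+" :: pvPFlat p) ++ ")" :: (pvCFlat c' ++ K)
          = (X ++ acc) ++ (last ++ "+" :: (pvPFlat p ++ ")" :: (pvCFlat c' ++ K))) := by simp
      rw [eSplit2, pvInsert_splice]
      -- recurse into the right operand
      have h1 := pvLA_P p hc.2.2.1 ((X ++ acc) ++ "(" :: (last ++ ["+"]))
        (")" :: (pvCFlat c' ++ K)) ((pvAcC c' + fuel) + 1)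
      have e1 : ((X ++ acc) ++ "(" :: (last ++ ["+"])) ++ pvPFlat p ++ (")" :: (pvCFlat c' ++ K))
          = (X ++ acc) ++ "(" :: (last ++ "+" :: (pvPFlat p ++ ")" :: (pvCFlat c' ++ K))) := by simp
      have e1b : ((X ++ acc) ++ "(" :: (last ++ ["+"])) ++ pvPT p ++ (")" :: (pvCFlat c' ++ K))
          = ((X ++ acc) ++ "(" :: (last ++ "+" :: pvPT p)) ++ ")" :: (pvCFlat c' ++ K) := by simp
      have e2 : ((((X ++ acc) ++ "(" :: (last ++ ["+"])).length : Nat) : Int)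
          = (((X ++ acc ++ last).length : Nat) : Int) + 2 := by
        simp
        omega
      rw [e1, e1b, e2] at h1
      rw [h1]
      have e2b : (((X ++ acc ++ last).length : Nat) : Int) + 2 + ((pvPT p).length : Int)
          = ((((X ++ acc) ++ "(" :: (last ++ "+" :: pvPT p)).length : Nat) : Int) := by
        simp
        omega
      rw [e2b]
      rw [pvALoop_skip ((X ++ acc) ++ "(" :: (last ++ "+" :: pvPT p)) ")" (pvCFlat c' ++ K)
        (by decide) (pvAcC c' + fuel)]
      -- recurse on the rest of the chain with the wrapped capsule
      have hBalIn : pvBal (last ++ "+" :: pvPT p) := by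
        have hb := pvBal_append last ("+" :: pvPT p) (pvCap_bal last hcap)
          (by
            have := pvBal_append ["+"] (pvPT p) (pvBal_single "+" (by decide))
              (pvPT_bal p hc.2.2.1)
            simpa using this)
        exact hb
      have hcap' : pvCap ("(" :: (last ++ "+" :: (pvPT p ++ [")"]))) := by
        refine Or.inr ⟨last ++ "+" :: pvPT p, hBalIn, ?_⟩
        simp
      have h2 := pvLA_C c' hc.2.2.2 X acc ("(" :: (last ++ "+" :: (pvPT p ++ [")"]))) K fuel hcap'
      have e3 : X ++ acc ++ ("(" :: (last ++ "+" :: (pvPT p ++ [")"]))) ++ pvCFlat c' ++ K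
          = ((X ++ acc) ++ "(" :: (last ++ "+" :: pvPT p)) ++ ")" :: (pvCFlat c' ++ K) := by simp
      have e4 : (X.length : Int) + (acc.length : Int)
            + ((("(" :: (last ++ "+" :: (pvPT p ++ [")"]))) : List String).length : Int)
          = ((((X ++ acc) ++ "(" :: (last ++ "+" :: pvPT p)).length : Nat) : Int) + 1 := by
        simp
        omega
      rw [e3, e4] at h2
      rw [h2]
      congr 1
    · have hc1 : pvAcC (.more o p c') + fuel = ((pvAcP p + (pvAcC c' + fuel)) + 1) := by
        simp [pvAcC, ho]; omega
      rw [hc1]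
      have hxs : X ++ acc ++ last ++ pvCFlat (.more o p c') ++ K
          = (X ++ acc ++ last) ++ o :: (pvPFlat p ++ (pvCFlat c' ++ K)) := by
        simp [pvCFlat]
      rw [hxs]
      have hidx : (X.length : Int) + (acc.length : Int) + (last.length : Int)
          = (((X ++ acc ++ last).length : Nat) : Int) := by
        simp
        omega
      rw [hidx]
      rw [pvALoop_skip (X ++ acc ++ last) o (pvPFlat p ++ (pvCFlat c' ++ K)) ho
        (pvAcP p + (pvAcC c' + fuel))]
      have h1 := pvLA_P p hc.2.2.1 ((X ++ acc ++ last) ++ [o]) (pvCFlat c' ++ K)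
        (pvAcC c' + fuel)
      have e1 : ((X ++ acc ++ last) ++ [o]) ++ pvPFlat p ++ (pvCFlat c' ++ K)
          = (X ++ acc ++ last) ++ o :: (pvPFlat p ++ (pvCFlat c' ++ K)) := by simp
      have e1b : ((X ++ acc ++ last) ++ [o]) ++ pvPT p ++ (pvCFlat c' ++ K)
          = X ++ (acc ++ last ++ [o]) ++ pvPT p ++ pvCFlat c' ++ K := by simp
      have e2 : ((((X ++ acc ++ last) ++ [o]).length : Nat) : Int)
          = (((X ++ acc ++ last).length : Nat) : Int) + 1 := by
        simp
        omega
      rw [e1, e1b, e2] at h1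
      rw [h1]
      have h2 := pvLA_C c' hc.2.2.2 X (acc ++ last ++ [o]) (pvPT p) K fuel
        (pvPT_cap p hc.2.2.1)
      have e3 : (((X ++ acc ++ last).length : Nat) : Int) + 1 + ((pvPT p).length : Int)
          = (X.length : Int) + ((acc ++ last ++ [o] : List String).length : Int)
            + ((pvPT p).length : Int) := by
        simp
        omega
      rw [← e3] at h2
      rw [h2]
      congr 1
      · simp [pvCGo, ho]
      · simp [pvCGo, ho]
end

-- ---- B's recursive descent on a segment ----

theorem pvParseP_eq (ts : List String) (fuel : Nat) (i : Int) (t : String)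
    (hg : PySem.List.pyGet? ts i = some t) :
    pvParseP ts (fuel+1) i
      = if t = "(" then
          (match pvParseE ts fuel (i+1) with
           | some (inner, j) => some ("(" :: (inner ++ [")"]), j + 1)
           | none => none)
        else some ([t], i + 1) := by
  simp only [pvParseP]
  rw [hg]

theorem pvParseLoop_step (ts : List String) (fuel : Nat) (acc last : List String) (i : Int)
    (o : String)
    (hcond : i < (ts.length : Int) ∧ PySem.List.pyGet? ts i ≠ some ")")
    (hg : PySem.List.pyGet? ts i = some o) :
    pvParseLoop ts (fuel+1) acc last i
      = match pvParseP ts fuel (i+1) with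
        | some (rhs, j) =>
          if o = "+" then pvParseLoop ts fuel acc ("(" :: (last ++ "+" :: (rhs ++ [")"]))) j
          else pvParseLoop ts fuel (acc ++ last ++ [o]) rhs j
        | none => none := by
  simp only [pvParseLoop]
  rw [if_pos hcond, hg]

theorem pvParseLoop_stop (ts : List String) (fuel : Nat) (acc last : List String) (i : Int)
    (hcond : ¬ (i < (ts.length : Int) ∧ PySem.List.pyGet? ts i ≠ some ")")) :
    pvParseLoop ts (fuel+1) acc last i = some (acc ++ last, i) := by
  simp only [pvParseLoop]
  rw [if_neg hcond]

mutual
theorem pvLB_P (p : PvP) (hp : pvPGood p) : ∀ (X K : List String) (fuel : Nat),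
    pvBcP p ≤ fuel →
    pvParseP (X ++ pvPFlat p ++ K) fuel ((X.length : Int))
      = some (pvPT p, (X.length : Int) + (pvPFlat p).length) := by
  cases p with
  | atom a =>
    intro X K fuel hf
    simp only [pvPGood] at hp
    simp only [pvBcP] at hf
    obtain ⟨f, rfl⟩ : ∃ f, fuel = f + 1 := ⟨fuel - 1, by omega⟩
    have hxs : X ++ pvPFlat (.atom a) ++ K = X ++ a :: K := by simp [pvPFlat]
    rw [hxs]
    have hg : PySem.List.pyGet? (X ++ a :: K) ((X.length : Int)) = some a :=
      PySem.List.pyGet?_append_length X K a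
    rw [pvParseP_eq _ _ _ _ hg, if_neg hp.1]
    simp [pvPT, pvPFlat]
  | grp p c =>
    intro X K fuel hf
    simp only [pvPGood] at hp
    simp only [pvBcP] at hf
    obtain ⟨f, rfl⟩ : ∃ f, fuel = f + 1 := ⟨fuel - 1, by omega⟩
    have hxs : X ++ pvPFlat (.grp p c) ++ K
        = X ++ "(" :: (pvPFlat p ++ (pvCFlat c ++ ")" :: K)) := by
      simp [pvPFlat]
    rw [hxs]
    have hg : PySem.List.pyGet? (X ++ "(" :: (pvPFlat p ++ (pvCFlat c ++ ")" :: K)))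
        ((X.length : Int)) = some "(" :=
      PySem.List.pyGet?_append_length X (pvPFlat p ++ (pvCFlat c ++ ")" :: K)) "("
    rw [pvParseP_eq _ _ _ _ hg, if_pos rfl]
    obtain ⟨f', rfl⟩ : ∃ f', f = f' + 1 := ⟨f - 1, by omega⟩
    have h1 := pvLB_P p hp.1 (X ++ ["("]) (pvCFlat c ++ ")" :: K) f' (by omega)
    have e1 : (X ++ ["("]) ++ pvPFlat p ++ (pvCFlat c ++ ")" :: K)
        = X ++ "(" :: (pvPFlat p ++ (pvCFlat c ++ ")" :: K)) := by simp
    rw [e1] at h1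
    have e2 : (((X ++ ["("]).length : Nat) : Int) = (X.length : Int) + 1 := by
      simp
    rw [e2] at h1
    have h2 := pvLB_C c hp.2 (X ++ "(" :: pvPFlat p) [] (pvPT p) (")" :: K) f'
      (by omega) (Or.inr ⟨K, rfl⟩)
    have e3 : (X ++ "(" :: pvPFlat p) ++ pvCFlat c ++ ")" :: K
        = X ++ "(" :: (pvPFlat p ++ (pvCFlat c ++ ")" :: K)) := by simp
    rw [e3] at h2
    have e4 : (((X ++ "(" :: pvPFlat p).length : Nat) : Int)
        = (X.length : Int) + 1 + (pvPFlat p).length := by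
      simp
      omega
    rw [e4] at h2
    have hE : pvParseE (X ++ "(" :: (pvPFlat p ++ (pvCFlat c ++ ")" :: K))) (f' + 1)
        ((X.length : Int) + 1)
        = some (pvCGo [] (pvPT p) c,
            (X.length : Int) + 1 + (pvPFlat p).length + (pvCFlat c).length) := by
      simp only [pvParseE]
      rw [h1]
      show pvParseLoop (X ++ "(" :: (pvPFlat p ++ (pvCFlat c ++ ")" :: K))) f' [] (pvPT p)
          ((X.length : Int) + 1 + (pvPFlat p).length) = _
      rw [h2]
    rw [hE]
    show some ("(" :: (pvCGo [] (pvPT p) c ++ [")"]),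
        ((X.length : Int) + 1 + (pvPFlat p).length + (pvCFlat c).length) + 1) = _
    simp only [pvPT, pvPFlat, Option.some.injEq, Prod.mk.injEq]
    refine ⟨by trivial, ?_⟩
    simp
    omega
theorem pvLB_C (c : PvC) (hc : pvCGood c) : ∀ (X acc last K : List String) (fuel : Nat),
    pvBcC c ≤ fuel → (K = [] ∨ ∃ K', K = ")" :: K') →
    pvParseLoop (X ++ pvCFlat c ++ K) fuel acc last ((X.length : Int))
      = some (pvCGo acc last c, (X.length : Int) + (pvCFlat c).length) := by
  cases c with
  | nil =>
    intro X acc last K fuel hf hK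
    simp only [pvBcC] at hf
    obtain ⟨f, rfl⟩ : ∃ f, fuel = f + 1 := ⟨fuel - 1, by omega⟩
    have hxs : X ++ pvCFlat .nil ++ K = X ++ K := by simp [pvCFlat]
    rw [hxs]
    have hcond : ¬ (((X.length : Nat) : Int) < (((X ++ K).length : Nat) : Int)
        ∧ PySem.List.pyGet? (X ++ K) ((X.length : Int)) ≠ some ")") := by
      rcases hK with rfl | ⟨K', rfl⟩
      · intro hcond
        have := hcond.1
        simp at this
      · intro hcond
        exact hcond.2 (PySem.List.pyGet?_append_length X K' ")")
    rw [pvParseLoop_stop _ _ _ _ _ hcond]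
    simp [pvCGo, pvCFlat]
  | more o p c' =>
    intro X acc last K fuel hf hK
    simp only [pvCGood] at hc
    simp only [pvBcC] at hf
    obtain ⟨f, rfl⟩ : ∃ f, fuel = f + 1 := ⟨fuel - 1, by omega⟩
    have hxs : X ++ pvCFlat (.more o p c') ++ K
        = X ++ o :: (pvPFlat p ++ (pvCFlat c' ++ K)) := by
      simp [pvCFlat]
    rw [hxs]
    have hg : PySem.List.pyGet? (X ++ o :: (pvPFlat p ++ (pvCFlat c' ++ K)))
        ((X.length : Int)) = some o :=
      PySem.List.pyGet?_append_length X (pvPFlat p ++ (pvCFlat c' ++ K)) o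
    have hcond : ((X.length : Nat) : Int)
          < (((X ++ o :: (pvPFlat p ++ (pvCFlat c' ++ K))).length : Nat) : Int)
        ∧ PySem.List.pyGet? (X ++ o :: (pvPFlat p ++ (pvCFlat c' ++ K)))
            ((X.length : Int)) ≠ some ")" := by
      constructor
      · simp
        omega
      · rw [hg]
        simp [hc.2.1]
    rw [pvParseLoop_step _ _ _ _ _ o hcond hg]
    have h1 := pvLB_P p hc.2.2.1 (X ++ [o]) (pvCFlat c' ++ K) f (by omega)
    have e1 : (X ++ [o]) ++ pvPFlat p ++ (pvCFlat c' ++ K)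
        = X ++ o :: (pvPFlat p ++ (pvCFlat c' ++ K)) := by simp
    rw [e1] at h1
    have e2 : (((X ++ [o]).length : Nat) : Int) = (X.length : Int) + 1 := by simp
    rw [e2] at h1
    rw [h1]
    show (if o = "+" then
        pvParseLoop (X ++ o :: (pvPFlat p ++ (pvCFlat c' ++ K))) f acc
          ("(" :: (last ++ "+" :: (pvPT p ++ [")"])))
          ((X.length : Int) + 1 + (pvPFlat p).length)
      else
        pvParseLoop (X ++ o :: (pvPFlat p ++ (pvCFlat c' ++ K))) f (acc ++ last ++ [o]) (pvPT p)
          ((X.length : Int) + 1 + (pvPFlat p).length)) = _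
    by_cases ho : o = "+"
    · subst ho
      rw [if_pos rfl]
      have h2 := pvLB_C c' hc.2.2.2 (X ++ "+" :: pvPFlat p) acc
        ("(" :: (last ++ "+" :: (pvPT p ++ [")"]))) K f (by omega) hK
      have e3 : (X ++ "+" :: pvPFlat p) ++ pvCFlat c' ++ K
          = X ++ "+" :: (pvPFlat p ++ (pvCFlat c' ++ K)) := by simp
      rw [e3] at h2
      have e4 : (((X ++ "+" :: pvPFlat p).length : Nat) : Int)
          = (X.length : Int) + 1 + (pvPFlat p).length := by
        simp
        omega
      rw [e4] at h2
      rw [h2]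
      simp only [pvCGo, if_pos, Option.some.injEq, Prod.mk.injEq]
      refine ⟨by trivial, ?_⟩
      simp [pvCFlat]
      omega
    · rw [if_neg ho]
      have h2 := pvLB_C c' hc.2.2.2 (X ++ o :: pvPFlat p) (acc ++ last ++ [o])
        (pvPT p) K f (by omega) hK
      have e3 : (X ++ o :: pvPFlat p) ++ pvCFlat c' ++ K
          = X ++ o :: (pvPFlat p ++ (pvCFlat c' ++ K)) := by simp
      rw [e3] at h2
      have e4 : (((X ++ o :: pvPFlat p).length : Nat) : Int)
          = (X.length : Int) + 1 + (pvPFlat p).length := by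
        simp
        omega
      rw [e4] at h2
      rw [h2]
      simp only [pvCGo, if_neg ho, Option.some.injEq, Prod.mk.injEq]
      refine ⟨by trivial, ?_⟩
      simp [pvCFlat]
      omega
end

-- ---- cost bounds ----

mutual
theorem pvAcP_le (p : PvP) : pvAcP p ≤ 2 * (pvPFlat p).length := by
  cases p with
  | atom a => simp [pvAcP, pvPFlat]
  | grp p c =>
    have h1 := pvAcP_le p
    have h2 := pvAcC_le c
    simp only [pvAcP, pvPFlat, List.length_cons, List.length_append]
    omega
theorem pvAcC_le (c : PvC) : pvAcC c ≤ 2 * (pvCFlat c).length := by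
  cases c with
  | nil => simp [pvAcC, pvCFlat]
  | more o p c =>
    have h1 := pvAcP_le p
    have h2 := pvAcC_le c
    simp only [pvAcC, pvCFlat, List.length_cons, List.length_append]
    split <;> omega
end

mutual
theorem pvBcP_le (p : PvP) : pvBcP p ≤ 2 * (pvPFlat p).length := by
  cases p with
  | atom a => simp [pvBcP, pvPFlat]
  | grp p c =>
    have h1 := pvBcP_le p
    have h2 := pvBcC_le c
    simp only [pvBcP, pvPFlat, List.length_cons, List.length_append]
    omega
theorem pvBcC_le (c : PvC) : pvBcC c ≤ 2 * (pvCFlat c).length + 1 := by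
  cases c with
  | nil => simp [pvBcC, pvCFlat]
  | more o p c =>
    have h1 := pvBcP_le p
    have h2 := pvBcC_le c
    simp only [pvBcC, pvCFlat, List.length_cons, List.length_append]
    omega
end

-- ---- the grammar checker accepts exactly flattenings of good trees ----

def pvRun (s : Bool × Nat) (ts : List String) : Option (Bool × Nat) :=
  ts.foldl pvChkStep (some s)

theorem pvRun_none (ts : List String) : ts.foldl pvChkStep none = none := by
  induction ts with
  | nil => rfl
  | cons t ts ih => simp [pvChkStep, ih, List.foldl]

theorem pvT3AB : ∀ (n : Nat),
    (∀ ts : List String, ts.length ≤ n → ∀ d : Nat, pvRun (true, d) ts = some (false, 0) →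
      ∃ p rest, pvPGood p ∧ ts = pvPFlat p ++ rest ∧ pvRun (false, d) rest = some (false, 0)) ∧
    (∀ ts : List String, ts.length ≤ n → ∀ d : Nat, pvRun (false, d) ts = some (false, 0) →
      ∃ c rest, pvCGood c ∧ ts = pvCFlat c ++ rest ∧
        ((rest = [] ∧ d = 0) ∨ ∃ rest' d', d = d' + 1 ∧ rest = ")" :: rest' ∧
          pvRun (false, d') rest' = some (false, 0))) := by
  intro n
  induction n using Nat.strong_induction_on with
  | _ n ih =>
    constructor
    · intro ts hlen d hrun
      cases ts with
      | nil =>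
        exfalso
        simp [pvRun] at hrun
      | cons t ts' =>
        have hn : 0 < n := by simp at hlen; omega
        by_cases h1 : t = "("
        · subst h1
          have hrun' : pvRun (true, d+1) ts' = some (false, 0) := by
            simpa [pvRun, pvChkStep] using hrun
          obtain ⟨p1, rest1, hp1, hts', hr1⟩ :=
            (ih (n-1) (by omega)).1 ts' (by simp at hlen; omega) (d+1) hrun'
          have hr1len : rest1.length ≤ n - 1 := by
            have h5 : ts'.length = (pvPFlat p1).length + rest1.length := by rw [hts']; simp
            simp at hlen; omega
          obtain ⟨c, rest2, hc, hrest1, hcl⟩ := (ih (n-1) (by omega)).2 rest1 hr1len (d+1) hr1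
          rcases hcl with ⟨-, hd⟩ | ⟨rest3, d', hd, hrr, hr3⟩
          · omega
          · have hdd : d' = d := by omega
            subst hdd
            subst hrr
            refine ⟨.grp p1 c, rest3, ?_, ?_, hr3⟩
            · simp only [pvPGood]
              exact ⟨hp1, hc⟩
            · rw [hts', hrest1]
              simp [pvPFlat]
        · by_cases h2 : t = ")" ∨ t = "+"
          · exfalso
            have hnone : pvRun (true, d) (t :: ts') = none := by
              simp [pvRun, pvChkStep, h1, h2, pvRun_none]
            rw [hnone] at hrun
            cases hrun
          · rw [not_or] at h2
            have hrun' : pvRun (false, d) ts' = some (false, 0) := by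
              simpa [pvRun, pvChkStep, h1, h2.1, h2.2] using hrun
            refine ⟨.atom t, ts', ?_, by simp [pvPFlat], hrun'⟩
            simp only [pvPGood]
            exact ⟨h1, h2.1, h2.2⟩
    · intro ts hlen d hrun
      cases ts with
      | nil =>
        have hd : d = 0 := by
          simp [pvRun] at hrun
          omega
        subst hd
        exact ⟨.nil, [], trivial, by simp [pvCFlat], Or.inl ⟨rfl, rfl⟩⟩
      | cons t ts' =>
        have hn : 0 < n := by simp at hlen; omega
        by_cases h1 : t = ")"
        · subst h1
          cases d with
          | zero =>
            exfalso
            have hnone : pvRun (false, 0) (")" :: ts') = none := by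
              simp [pvRun, pvChkStep, pvRun_none]
            rw [hnone] at hrun
            cases hrun
          | succ d' =>
            have hrun' : pvRun (false, d') ts' = some (false, 0) := by
              simpa [pvRun, pvChkStep] using hrun
            exact ⟨.nil, ")" :: ts', trivial, by simp [pvCFlat],
              Or.inr ⟨ts', d', rfl, rfl, hrun'⟩⟩
        · by_cases h2 : t = "("
          · exfalso
            have hnone : pvRun (false, d) (t :: ts') = none := by
              simp [pvRun, pvChkStep, h2, pvRun_none]
            rw [hnone] at hrun
            cases hrun
          · have hrun' : pvRun (true, d) ts' = some (false, 0) := by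
              simpa [pvRun, pvChkStep, h1, h2] using hrun
            obtain ⟨p1, rest1, hp1, hts', hr1⟩ :=
              (ih (n-1) (by omega)).1 ts' (by simp at hlen; omega) d hrun'
            have hr1len : rest1.length ≤ n - 1 := by
              have h5 : ts'.length = (pvPFlat p1).length + rest1.length := by rw [hts']; simp
              simp at hlen; omega
            obtain ⟨c', rest2, hc', hrest1, hcl⟩ := (ih (n-1) (by omega)).2 rest1 hr1len d hr1
            refine ⟨.more t p1 c', rest2, ?_, ?_, hcl⟩
            · simp only [pvCGood]
              exact ⟨h2, h1, hp1, hc'⟩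
            · rw [hts', hrest1]
              simp [pvCFlat]

theorem pvT3 (ts : List String) (h : pvRun (true, 0) ts = some (false, 0)) :
    ∃ p c, pvPGood p ∧ pvCGood c ∧ ts = pvPFlat p ++ pvCFlat c := by
  obtain ⟨p, rest, hp, hts, hr⟩ := (pvT3AB ts.length).1 ts le_rfl 0 h
  have hrl : rest.length ≤ ts.length := by
    rw [hts]; simp
  obtain ⟨c, rest2, hc, hrest, hcl⟩ := (pvT3AB ts.length).2 rest hrl 0 hr
  rcases hcl with ⟨hnil, -⟩ | ⟨rest', d', hd, -, -⟩
  · subst hnil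
    refine ⟨p, c, hp, hc, ?_⟩
    rw [hts, hrest]
    simp
  · omega

-- ---- assembling both sides on a well-formed expression ----

theorem pvA_wf (p : PvP) (c : PvC) (hp : pvPGood p) (hc : pvCGood c) :
    paranthesize_addition (pvPFlat p ++ pvCFlat c) = pvCGo [] (pvPT p) c := by
  unfold paranthesize_addition
  obtain ⟨rest, hrest⟩ : ∃ rest, 3 * (pvPFlat p ++ pvCFlat c).length + 2
      = pvAcP p + (pvAcC c + (rest + 1)) := by
    have h1 := pvAcP_le p
    have h2 := pvAcC_le c
    refine ⟨3 * (pvPFlat p ++ pvCFlat c).length + 1 - pvAcP p - pvAcC c, ?_⟩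
    have h3 : (pvPFlat p ++ pvCFlat c).length = (pvPFlat p).length + (pvCFlat c).length := by
      simp
    omega
  rw [hrest]
  have h1 := pvLA_P p hp [] (pvCFlat c) (pvAcC c + (rest + 1))
  have e1 : ([] : List String) ++ pvPFlat p ++ pvCFlat c = pvPFlat p ++ pvCFlat c := by simp
  have e1b : ([] : List String) ++ pvPT p ++ pvCFlat c = [] ++ [] ++ pvPT p ++ pvCFlat c ++ [] := by
    simp
  have e2 : ((([] : List String).length : Nat) : Int) = 0 := by simp
  rw [e1, e1b, e2] at h1
  have e3 : (0 : Int) + ((pvPT p).length : Int)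
      = ((([] : List String).length : Nat) : Int) + ((([] : List String).length : Nat) : Int)
        + ((pvPT p).length : Int) := by simp
  rw [e3] at h1
  rw [h1]
  have h2 := pvLA_C c hc [] [] (pvPT p) [] (rest + 1) (pvPT_cap p hp)
  rw [h2]
  have e4 : ((([] : List String).length : Nat) : Int) + ((pvCGo [] (pvPT p) c).length : Int)
      = ((([] ++ pvCGo [] (pvPT p) c ++ [] : List String).length : Nat) : Int) := by simp
  rw [e4]
  rw [pvALoop_done _ _ le_rfl rest]
  simp

theorem pvB_wf (p : PvP) (c : PvC) (hp : pvPGood p) (hc : pvCGood c)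
    (hplus : (pvPFlat p ++ pvCFlat c).contains "+" = true) :
    paranthesize_addition_alt (pvPFlat p ++ pvCFlat c) = pvCGo [] (pvPT p) c := by
  unfold paranthesize_addition_alt
  rw [if_pos hplus]
  have hfeq : 2 * (pvPFlat p ++ pvCFlat c).length + 2
      = (2 * (pvPFlat p ++ pvCFlat c).length + 1) + 1 := by omega
  have h1 := pvLB_P p hp [] (pvCFlat c) (2 * (pvPFlat p ++ pvCFlat c).length + 1)
    (by
      have := pvBcP_le p
      simp only [List.length_append]
      omega)
  have e1 : ([] : List String) ++ pvPFlat p ++ pvCFlat c = pvPFlat p ++ pvCFlat c := by simp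
  have e2 : ((([] : List String).length : Nat) : Int) = 0 := by simp
  rw [e1, e2] at h1
  have e3 : (0 : Int) + ((pvPFlat p).length : Int) = (((pvPFlat p).length : Nat) : Int) := by simp
  rw [e3] at h1
  have h2 := pvLB_C c hc (pvPFlat p) [] (pvPT p) [] (2 * (pvPFlat p ++ pvCFlat c).length + 1)
    (by
      have := pvBcC_le c
      simp only [List.length_append]
      omega)
    (Or.inl rfl)
  have e4 : pvPFlat p ++ pvCFlat c ++ ([] : List String) = pvPFlat p ++ pvCFlat c := by simp
  rw [e4] at h2
  have hE : pvParseE (pvPFlat p ++ pvCFlat c) (2 * (pvPFlat p ++ pvCFlat c).length + 1 + 1) 0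
      = some (pvCGo [] (pvPT p) c,
          (((pvPFlat p).length : Nat) : Int) + ((pvCFlat c).length : Int)) := by
    simp only [pvParseE]
    rw [h1]
    show pvParseLoop (pvPFlat p ++ pvCFlat c) (2 * (pvPFlat p ++ pvCFlat c).length + 1) [] (pvPT p)
        (((pvPFlat p).length : Nat) : Int) = _
    rw [h2]
  rw [hfeq, hE]


-- ===== VERDICT (by name: the statement is the Claim_ definition above) =====
theorem paranthesize_addition_spec : Claim_equal_paranthesize_addition := by
  intro tokens hdom hpre
  unfold Spec_paranthesize_addition
  by_cases hct : tokens.contains "+" = true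
  · have hwf : tokens.foldl pvChkStep (some (true, 0)) = some (false, 0) := by
      rcases hpre with h | h
      · rw [hct] at h; cases h
      · exact h
    obtain ⟨p, c, hp, hc, rfl⟩ := pvT3 tokens hwf
    rw [pvA_wf p c hp hc, pvB_wf p c hp hc hct]
  · have hnp : "+" ∉ tokens := by
      intro hm
      exact hct (List.contains_iff_mem.mpr hm)
    have hA : paranthesize_addition tokens = tokens := by
      unfold paranthesize_addition
      rw [pvALoop_noplus tokens hnp (3 * tokens.length + 2) 0 (by omega) (by positivity)
        (by push_cast; omega)]
      rfl
    have hB : paranthesize_addition_alt tokens = tokens := by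
      unfold paranthesize_addition_alt
      rw [if_neg hct]
    rw [hA, hB]
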